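-- pv_equiv track=rewrite | github.com/MoseleyBioinformaticsLab/academic_tracker | src/academic_tracker/helper_functions.py | find_common_subphrases
-- ===== SOURCE A (Python) =====
-- def find_common_subphrases(str1, str2, min_len=2):
--     """Find all common subphrases between str1 and str2 longer than min_len.
--
--     Modified from https://stackoverflow.com/a/63337541/19957088.
--     Find all common subphrases between the 2 strings, but filer out common subphrases
--     between subphrases. For example, if "sand" is common between the 2 strings the
--     function will not return "and" unless there is another instance of "and" between
--     the 2 strings. A phrase is a string that must end in a space or be at the end
--     of the string. So "sand asdf" and "sand awer" will only match "sand " and not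
--     "sand a". Spaces are expected to be meaningful. It is recommended to remove
--     punctuation from the strings.
--
--     Args:
--         str1 (str): one of the 2 strings to look for common substrings in.
--         str2 (str): one of the 2 strings to look for common substrings in.
--         min_len (int): if the length of a substring is less than this, then ignore it.
--
--     Returns:
--         cs_array (list): a list of the common substrings.
--     """
--     len1, len2 = len(str1), len(str2)
--
--     if len1 > len2:
--         str1, str2 = str2, str1
--         len1, len2 = len2, len1
--
--     cs_array=[]
--     cs_array_index = []
--     for i in range(len1, min_len-1, -1):
--         for k in range(len1-i+1):
--             end_index = i + k
--             sub_string = str1[k:end_index]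
--             if sub_string[-1] != " " and end_index < len1 and sub_string[0] != " " and k > 0:
--                 continue
--             if sub_string in str2:
--                 flag = 1
--                 for m in range(len(cs_array)):
--                     if (sub_string in cs_array[m] and\
--                        ## Have to make sure the sub_string is in the same index range as what it matched.
--                        ## Otherwise, "and" won't get matched between 'sand asdf and' and 'sand and'.
--                        k >= cs_array_index[m][0] and end_index <= cs_array_index[m][1]) or (\
--                        ## We don't want to return overlapping substrings, without the below check 'sand asdf and'
--                        ## and 'sand and' will return 'sand a' and 'and' instead of 'sand a' and 'nd'.
--                        ## This is undesirable for us because we plan to remove the found substrings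
--                        ## after this function, and overlapping substrings make that harder.
--                        (k >= cs_array_index[m][0] and k < cs_array_index[m][1])):
--                         flag=0
--                         break
--                 if flag == 1:
--                     cs_array.append(sub_string)
--                     cs_array_index.append([k, end_index])
--     return cs_array
-- ===== SOURCE B (Python) =====
-- def find_common_subphrases(str1, str2, min_len=2):
--     """Staged pipeline: (1) enumerate every boundary candidate (start, end) whose
--     substring occurs in str2, start-major; (2) sort longest-first / leftmost-first;
--     (3) one greedy pass keeps each candidate whose start is not yet covered."""
--     if len(str1) > len(str2):
--         str1, str2 = str2, str1
--     n = len(str1)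
--     cands = [(k, e)
--              for k in range(n + 1 - min_len)
--              for e in range(k + min_len, n + 1)
--              if (k == 0 or str1[k] == " " or e == n or str1[e - 1] == " ")
--              and str1[k:e] in str2]
--     cands.sort(key=lambda p: (p[0] - p[1], p[0]))
--     covered = set()
--     out = []
--     for k, e in cands:
--         if k not in covered:
--             out.append(str1[k:e])
--             covered.update(range(k, e))
--     return out
-- ===== Notes on version B (the rewrite author's own statement) =====
-- stated objective: faster
-- what changed: A's single interleaved longest-first nested loop with a per-candidate rescan of the accepted-substring/index lists is replaced by a staged pipeline: one comprehension enumerates all boundary candidates occurring in str2 start-major, a sort by (-length, start) recreates the selection order, and a single greedy pass with a covered-start set picks the non-overlapping ones.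
import Mathlib
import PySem

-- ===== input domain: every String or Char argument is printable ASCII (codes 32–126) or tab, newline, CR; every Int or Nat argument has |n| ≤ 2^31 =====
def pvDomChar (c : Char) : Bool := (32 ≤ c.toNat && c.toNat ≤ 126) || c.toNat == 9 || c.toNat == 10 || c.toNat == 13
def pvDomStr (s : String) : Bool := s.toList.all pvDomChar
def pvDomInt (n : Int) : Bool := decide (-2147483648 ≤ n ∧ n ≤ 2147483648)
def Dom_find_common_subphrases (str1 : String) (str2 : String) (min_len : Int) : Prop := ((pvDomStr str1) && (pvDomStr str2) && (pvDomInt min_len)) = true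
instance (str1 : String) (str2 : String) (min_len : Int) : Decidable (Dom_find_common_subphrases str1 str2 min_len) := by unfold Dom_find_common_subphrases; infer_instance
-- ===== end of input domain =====

-- B replaces A's single interleaved longest-first double loop (with its rescan of the
-- accepted list per candidate) by a staged pipeline: enumerate all matching boundary
-- candidates start-major, sort them longest-first, then one greedy covered-start pass.

-- ===== PORT A =====
-- one candidate step of A's double loop; state = (cs_array, cs_array_index)
def fcsAstep (s1 s2 : List Char) (len1 : Int)
    (st : List (List Char) × List (Int × Int)) (i k : Int) :
    List (List Char) × List (Int × Int) :=
  let end_index := i + k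
  let sub_string := PySem.List.slice s1 (some k) (some end_index)
  -- `sub_string[-1]` / `sub_string[0]` via pyGet?; Python raises where pyGet? is none (excluded by Pre_)
  if PySem.Chars.pyGet? sub_string (-1) ≠ some ' ' ∧ end_index < len1 ∧
      PySem.Chars.pyGet? sub_string 0 ≠ some ' ' ∧ k > 0 then st
  else if PySem.Chars.isIn sub_string s2 then
    -- the `for m in range(len(cs_array)) … break` flag loop
    let flag := !((PySem.List.pyRange 0 (st.1.length : Int) 1).any (fun m =>
      (PySem.Chars.isIn sub_string (PySem.List.pyGetD st.1 m []) &&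
        decide (k ≥ (PySem.List.pyGetD st.2 m (0, 0)).1) &&
        decide (end_index ≤ (PySem.List.pyGetD st.2 m (0, 0)).2)) ||
      (decide (k ≥ (PySem.List.pyGetD st.2 m (0, 0)).1) &&
        decide (k < (PySem.List.pyGetD st.2 m (0, 0)).2))))
    if flag then (st.1 ++ [sub_string], st.2 ++ [(k, end_index)]) else st
  else st

-- A's double loop after the initial swap
def fcsAmain (s1 s2 : List Char) (min_len : Int) : List String :=
  let len1 : Int := (s1.length : Int)
  let st := (PySem.List.pyRange len1 (min_len - 1) (-1)).foldl
    (fun st i => (PySem.List.pyRange 0 (len1 - i + 1) 1).foldl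
      (fun st k => fcsAstep s1 s2 len1 st i k) st)
    ([], [])
  st.1.map (fun cs => String.ofList cs)

def find_common_subphrases (str1 : String) (str2 : String) (min_len : Int) : List String :=
  let l1 := str1.toList
  let l2 := str2.toList
  -- `if len1 > len2: str1, str2 = str2, str1`
  if (l1.length : Int) > (l2.length : Int) then fcsAmain l2 l1 min_len
  else fcsAmain l1 l2 min_len

-- ===== PORT B =====
-- the comprehension's test: boundary candidate (k==0 or str1[k]==' ' or e==n or str1[e-1]==' ')
-- whose substring occurs in str2
def fcsPass (s1 s2 : List Char) (n k e : Int) : Bool :=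
  (decide (k = 0) || (PySem.Chars.pyGet? s1 k == some ' ') || decide (e = n) ||
    (PySem.Chars.pyGet? s1 (e - 1) == some ' ')) &&
  PySem.Chars.isIn (PySem.List.slice s1 (some k) (some e)) s2

-- stage 1: the list comprehension (start-major enumeration)
def fcsBcands (s1 s2 : List Char) (min_len : Int) : List (Int × Int) :=
  let n : Int := (s1.length : Int)
  (PySem.List.pyRange 0 (n + 1 - min_len) 1).flatMap (fun k =>
    ((PySem.List.pyRange (k + min_len) (n + 1) 1).filter (fun e =>
      fcsPass s1 s2 n k e)).map (fun e => (k, e)))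

-- stage 3: one iteration of the greedy `for k, e in cands` loop; state = (covered, out)
def fcsBgreedyStep (s1 : List Char) (st : PySem.Set Int × List (List Char)) (p : Int × Int) :
    PySem.Set Int × List (List Char) :=
  if PySem.Set.contains st.1 p.1 then st
  else (PySem.Set.update st.1 (PySem.List.pyRange p.1 p.2 1),
        st.2 ++ [PySem.List.slice s1 (some p.1) (some p.2)])

-- B after the initial swap: enumerate, sort by (k - e, k) (stage 2), greedy pass
def fcsBmain (s1 s2 : List Char) (min_len : Int) : List String :=
  let cands := PySem.List.sorted2 (fcsBcands s1 s2 min_len)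
    (fun p => p.1 - p.2) (fun p => p.1)
  let st := cands.foldl (fcsBgreedyStep s1) (PySem.Set.empty, [])
  st.2.map (fun cs => String.ofList cs)

def find_common_subphrases_alt (str1 : String) (str2 : String) (min_len : Int) : List String :=
  let l1 := str1.toList
  let l2 := str2.toList
  if (l1.length : Int) > (l2.length : Int) then fcsBmain l2 l1 min_len
  else fcsBmain l1 l2 min_len

-- ===== PRECONDITION & SPEC =====
-- Pre_ excludes min_len ≤ 0, where A reaches the empty substring and `sub_string[-1]` raises IndexError.
def Pre_find_common_subphrases (str1 : String) (str2 : String) (min_len : Int) : Prop :=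
  1 ≤ min_len
instance (str1 : String) (str2 : String) (min_len : Int) : Decidable (Pre_find_common_subphrases str1 str2 min_len) := by unfold Pre_find_common_subphrases; infer_instance

def pvWitness_find_common_subphrases : String × String × Int := ("sand asdf and", "sand and", 2)

def Spec_find_common_subphrases (str1 : String) (str2 : String) (min_len : Int) (out : List String) : Prop := out = find_common_subphrases_alt str1 str2 min_len
instance (str1 : String) (str2 : String) (min_len : Int) (out : List String) : Decidable (Spec_find_common_subphrases str1 str2 min_len out) := by unfold Spec_find_common_subphrases; infer_instance

-- ===== CLAIM (what is proved, stated in full; the proofs are below) =====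
def Claim_equal_find_common_subphrases : Prop := ∀ (str1 : String) (str2 : String) (min_len : Int), Dom_find_common_subphrases str1 str2 min_len → Pre_find_common_subphrases str1 str2 min_len → Spec_find_common_subphrases str1 str2 min_len (find_common_subphrases str1 str2 min_len)

-- ===== LEMMAS AND PROOFS =====

-- proof-side intermediate: A's loop with the accepted-list rescan replaced by a covered-start set
def fcsCstep (s1 s2 : List Char) (n : Int)
    (st : PySem.Set Int × List (List Char)) (i k : Int) :
    PySem.Set Int × List (List Char) :=
  let e := k + i
  let sub := PySem.List.slice s1 (some k) (some e)
  if !(decide (k = 0) || (PySem.Chars.pyGet? sub 0 == some ' ') || decide (e = n) ||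
      (PySem.Chars.pyGet? sub (-1) == some ' ')) then st
  else if PySem.Set.contains st.1 k then st
  else if PySem.Chars.isIn sub s2 then
    (PySem.Set.update st.1 (PySem.List.pyRange k e 1), st.2 ++ [sub])
  else st

-- the relation between A's state and the covered-set state
def fcsInv (stA : List (List Char) × List (Int × Int))
    (stB : PySem.Set Int × List (List Char)) : Prop :=
  stB.2 = stA.1 ∧ stA.1.length = stA.2.length ∧
  ∀ j : Int, j ∈ stB.1 ↔ ∃ q ∈ stA.2, q.1 ≤ j ∧ j < q.2

-- A's flag-loop fires exactly on candidates whose start index lies in an accepted interval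
lemma fcsA_any_iff (sub : List Char) (k e : Int) (he : k < e)
    (cs : List (List Char)) (idx : List (Int × Int)) (hlen : cs.length = idx.length) :
    ((PySem.List.pyRange 0 (cs.length : Int) 1).any (fun m =>
      (PySem.Chars.isIn sub (PySem.List.pyGetD cs m []) &&
        decide (k ≥ (PySem.List.pyGetD idx m (0, 0)).1) &&
        decide (e ≤ (PySem.List.pyGetD idx m (0, 0)).2)) ||
      (decide (k ≥ (PySem.List.pyGetD idx m (0, 0)).1) &&
        decide (k < (PySem.List.pyGetD idx m (0, 0)).2))) = true)
    ↔ ∃ q ∈ idx, q.1 ≤ k ∧ k < q.2 := by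
  rw [List.any_eq_true]
  constructor
  · rintro ⟨m, hm, hcond⟩
    rw [PySem.List.mem_pyRange_one] at hm
    obtain ⟨hm0, hmL⟩ := hm
    have hmN : m.toNat < idx.length := by omega
    have hget : PySem.List.pyGetD idx m (0, 0) = idx[m.toNat] :=
      PySem.List.pyGetD_eq_getElem idx (0, 0) hm0 (by omega)
    rw [hget] at hcond
    refine ⟨idx[m.toNat], List.getElem_mem hmN, ?_⟩
    simp only [Bool.or_eq_true, Bool.and_eq_true, decide_eq_true_eq] at hcond
    rcases hcond with ⟨⟨_, h1⟩, h2⟩ | ⟨h1, h2⟩ <;> omega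
  · rintro ⟨q, hq, hq1, hq2⟩
    obtain ⟨mN, hmN, rfl⟩ := List.getElem_of_mem hq
    have hget : PySem.List.pyGetD idx (mN : Int) (0, 0) = idx[mN] := by
      have := PySem.List.pyGetD_eq_getElem idx (0, 0)
        (show (0 : Int) ≤ (mN : Int) by omega) (show (mN : Int) < (idx.length : Int) by omega)
      simpa using this
    refine ⟨(mN : Int), ?_, ?_⟩
    · rw [PySem.List.mem_pyRange_one]; omega
    · simp only [hget, Bool.or_eq_true, Bool.and_eq_true, decide_eq_true_eq]
      right; exact ⟨hq1, hq2⟩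

-- one lock-step: A's step and the covered-set step preserve the invariant
lemma fcsStep_inv (s1 s2 : List Char) (n i k : Int)
    (hi : 1 ≤ i) (hk : 0 ≤ k) (hik : k + i ≤ n)
    (stA : List (List Char) × List (Int × Int)) (stB : PySem.Set Int × List (List Char))
    (hInv : fcsInv stA stB) :
    fcsInv (fcsAstep s1 s2 n stA i k) (fcsCstep s1 s2 n stB i k) := by
  obtain ⟨hres, hlen, hmem⟩ := hInv
  unfold fcsAstep fcsCstep
  have hcomm : k + i = i + k := by ring
  simp only [hcomm]
  set sub := PySem.List.slice s1 (some k) (some (i + k)) with hsub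
  -- the two skip guards are equivalent (uses 0 ≤ k and i + k ≤ n)
  have hguard : (!(decide (k = 0) || (PySem.Chars.pyGet? sub 0 == some ' ') ||
      decide (i + k = n) || (PySem.Chars.pyGet? sub (-1) == some ' '))) = true ↔
      (PySem.Chars.pyGet? sub (-1) ≠ some ' ' ∧ i + k < n ∧
        PySem.Chars.pyGet? sub 0 ≠ some ' ' ∧ k > 0) := by
    rw [Bool.not_eq_true']
    simp only [Bool.or_eq_false_iff, decide_eq_false_iff_not, beq_eq_false_iff_ne]
    constructor
    · rintro ⟨⟨⟨h4, h3⟩, h2⟩, h1⟩; exact ⟨h1, by omega, h3, by omega⟩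
    · rintro ⟨h1, h2, h3, h4⟩; exact ⟨⟨⟨by omega, h3⟩, by omega⟩, h1⟩
  by_cases hg : PySem.Chars.pyGet? sub (-1) ≠ some ' ' ∧ i + k < n ∧
      PySem.Chars.pyGet? sub 0 ≠ some ' ' ∧ k > 0
  · rw [if_pos hg, if_pos (hguard.mpr hg)]
    exact ⟨hres, hlen, hmem⟩
  · rw [if_neg hg, if_neg (fun hb => hg (hguard.mp hb))]
    have hany : ((PySem.List.pyRange 0 (stA.1.length : Int) 1).any (fun m =>
        (PySem.Chars.isIn sub (PySem.List.pyGetD stA.1 m []) &&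
          decide (k ≥ (PySem.List.pyGetD stA.2 m (0, 0)).1) &&
          decide (i + k ≤ (PySem.List.pyGetD stA.2 m (0, 0)).2)) ||
        (decide (k ≥ (PySem.List.pyGetD stA.2 m (0, 0)).1) &&
          decide (k < (PySem.List.pyGetD stA.2 m (0, 0)).2))) = true)
        ↔ PySem.Set.contains stB.1 k = true := by
      rw [PySem.Set.contains_iff, hmem]
      exact fcsA_any_iff sub k (i + k) (by omega) stA.1 stA.2 hlen
    by_cases hin : PySem.Chars.isIn sub s2 = true
    · rw [if_pos hin]
      by_cases hcov : PySem.Set.contains stB.1 k = true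
      · rw [if_pos hcov]
        have hflag : (!((PySem.List.pyRange 0 (stA.1.length : Int) 1).any (fun m =>
            (PySem.Chars.isIn sub (PySem.List.pyGetD stA.1 m []) &&
              decide (k ≥ (PySem.List.pyGetD stA.2 m (0, 0)).1) &&
              decide (i + k ≤ (PySem.List.pyGetD stA.2 m (0, 0)).2)) ||
            (decide (k ≥ (PySem.List.pyGetD stA.2 m (0, 0)).1) &&
              decide (k < (PySem.List.pyGetD stA.2 m (0, 0)).2))))) = false := by
          rw [Bool.not_eq_false']
          exact hany.mpr hcov
        rw [if_neg (by simp [hflag])]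
        exact ⟨hres, hlen, hmem⟩
      · rw [if_neg hcov, if_pos hin]
        have hflag : (!((PySem.List.pyRange 0 (stA.1.length : Int) 1).any (fun m =>
            (PySem.Chars.isIn sub (PySem.List.pyGetD stA.1 m []) &&
              decide (k ≥ (PySem.List.pyGetD stA.2 m (0, 0)).1) &&
              decide (i + k ≤ (PySem.List.pyGetD stA.2 m (0, 0)).2)) ||
            (decide (k ≥ (PySem.List.pyGetD stA.2 m (0, 0)).1) &&
              decide (k < (PySem.List.pyGetD stA.2 m (0, 0)).2))))) = true := by
          rw [Bool.not_eq_true']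
          exact Bool.eq_false_iff.mpr (fun h => hcov (hany.mp h))
        rw [if_pos hflag]
        refine ⟨by simp [hres], by simp [hlen], fun j => ?_⟩
        rw [PySem.Set.mem_update]
        simp only [List.mem_append, List.mem_singleton, hmem, PySem.List.mem_pyRange_one]
        constructor
        · rintro (⟨q, hq, h1, h2⟩ | ⟨h1, h2⟩)
          · exact ⟨q, Or.inl hq, h1, h2⟩
          · exact ⟨(k, i + k), Or.inr rfl, h1, h2⟩
        · rintro ⟨q, hq | rfl, h1, h2⟩
          · exact Or.inl ⟨q, hq, h1, h2⟩
          · exact Or.inr ⟨h1, h2⟩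
    · rw [if_neg hin]
      by_cases hcov : PySem.Set.contains stB.1 k = true
      · rw [if_pos hcov]; exact ⟨hres, hlen, hmem⟩
      · rw [if_neg hcov, if_neg hin]; exact ⟨hres, hlen, hmem⟩

-- the invariant survives a whole list of in-bounds candidates
lemma fcsFold_inv (s1 s2 : List Char) (n : Int) (l : List (Int × Int))
    (hl : ∀ p ∈ l, 1 ≤ p.1 ∧ 0 ≤ p.2 ∧ p.2 + p.1 ≤ n) :
    ∀ (stA : List (List Char) × List (Int × Int)) (stB : PySem.Set Int × List (List Char)),
    fcsInv stA stB →
    fcsInv (l.foldl (fun st p => fcsAstep s1 s2 n st p.1 p.2) stA)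
           (l.foldl (fun st p => fcsCstep s1 s2 n st p.1 p.2) stB) := by
  induction l with
  | nil => intro stA stB h; exact h
  | cons p t ih =>
    intro stA stB h
    simp only [List.foldl_cons]
    obtain ⟨h1, h2, h3⟩ := hl p (by simp)
    exact ih (fun q hq => hl q (List.mem_cons_of_mem _ hq)) _ _
      (fcsStep_inv s1 s2 n p.1 p.2 h1 h2 h3 stA stB h)

-- the flattened candidate list of A's double loop
def fcsCands (n min_len : Int) : List (Int × Int) :=
  (PySem.List.pyRange n (min_len - 1) (-1)).flatMap
    (fun i => (PySem.List.pyRange 0 (n - i + 1) 1).map (fun k => (i, k)))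

lemma fcsCands_bounds (n min_len : Int) (hml : 1 ≤ min_len) :
    ∀ p ∈ fcsCands n min_len, 1 ≤ p.1 ∧ 0 ≤ p.2 ∧ p.2 + p.1 ≤ n := by
  intro p hp
  unfold fcsCands at hp
  rw [List.mem_flatMap] at hp
  obtain ⟨i, hi, hp⟩ := hp
  rw [List.mem_map] at hp
  obtain ⟨k, hk, rfl⟩ := hp
  rw [PySem.List.mem_pyRange_neg_one] at hi
  rw [PySem.List.mem_pyRange_one] at hk
  exact ⟨by omega, by omega, by omega⟩

-- a nested double foldl is a foldl over the flattened candidate list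
lemma fcsNested_eq_flat {σ : Type} (n min_len : Int)
    (step : σ → Int → Int → σ) (init : σ) :
    (PySem.List.pyRange n (min_len - 1) (-1)).foldl
      (fun st i => (PySem.List.pyRange 0 (n - i + 1) 1).foldl
        (fun st k => step st i k) st) init
    = (fcsCands n min_len).foldl (fun st p => step st p.1 p.2) init := by
  unfold fcsCands
  rw [List.foldl_flatMap]
  congr 1
  funext st i
  rw [List.foldl_map]

-- A's result equals the covered-set fold over the flattened candidate list
lemma fcsA_eq_cfold (s1 s2 : List Char) (min_len : Int) (hml : 1 ≤ min_len) :
    fcsAmain s1 s2 min_len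
    = ((fcsCands (s1.length : Int) min_len).foldl
        (fun st p => fcsCstep s1 s2 (s1.length : Int) st p.1 p.2)
        (PySem.Set.empty, [])).2.map (fun cs => String.ofList cs) := by
  simp only [fcsAmain]
  rw [fcsNested_eq_flat ((s1.length : Int)) min_len
      (fun st i k => fcsAstep s1 s2 (s1.length : Int) st i k) ([], [])]
  have hInv0 : fcsInv ([], []) ((PySem.Set.empty : PySem.Set Int), ([] : List (List Char))) := by
    refine ⟨rfl, rfl, fun j => ?_⟩
    simp [PySem.Set.empty]
  have h := fcsFold_inv s1 s2 (s1.length : Int) (fcsCands (s1.length : Int) min_len)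
    (fcsCands_bounds (s1.length : Int) min_len hml)
    ([], []) (PySem.Set.empty, []) hInv0
  rw [h.1]

-- head and last character of an in-range slice
lemma fcs_slice_get_zero (s1 : List Char) (k e : Int)
    (h0 : 0 ≤ k) (hke : k < e) (_hen : e ≤ (s1.length : Int)) :
    PySem.Chars.pyGet? (PySem.List.slice s1 (some k) (some e)) 0
      = PySem.Chars.pyGet? s1 k := by
  rw [PySem.List.slice_toNat s1 h0 (by omega)]
  rw [show PySem.Chars.pyGet? = PySem.List.pyGet? from rfl]
  rw [PySem.List.pyGet?_zero, PySem.List.pyGet?_of_nonneg _ h0]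
  rw [List.getElem?_take]
  simp only [List.getElem?_drop]
  rw [if_pos (by omega)]
  norm_num

lemma fcs_slice_get_last (s1 : List Char) (k e : Int)
    (h0 : 0 ≤ k) (hke : k < e) (hen : e ≤ (s1.length : Int)) :
    PySem.Chars.pyGet? (PySem.List.slice s1 (some k) (some e)) (-1)
      = PySem.Chars.pyGet? s1 (e - 1) := by
  rw [PySem.List.slice_toNat s1 h0 (by omega)]
  rw [show PySem.Chars.pyGet? = PySem.List.pyGet? from rfl]
  rw [PySem.List.pyGet?_neg_one, PySem.List.pyGet?_of_nonneg _ (by omega : (0:Int) ≤ e - 1)]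
  rw [List.getLast?_eq_getElem?]
  have hlen : (List.take (e.toNat - k.toNat) (List.drop k.toNat s1)).length
      = e.toNat - k.toNat := by
    simp [List.length_take, List.length_drop]
    omega
  rw [hlen, List.getElem?_take, if_pos (by omega)]
  simp only [List.getElem?_drop]
  congr 1
  omega

-- the covered-set step in terms of fcsPass: passing candidates act like B's greedy step …
lemma fcsCstep_pass (s1 s2 : List Char) (n i k : Int)
    (hi : 1 ≤ i) (hk : 0 ≤ k) (hik : k + i ≤ n) (hn : n = (s1.length : Int))
    (st : PySem.Set Int × List (List Char))
    (hp : fcsPass s1 s2 n k (k + i) = true) :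
    fcsCstep s1 s2 n st i k = fcsBgreedyStep s1 st (k, k + i) := by
  have hz := fcs_slice_get_zero s1 k (k + i) hk (by omega) (by omega)
  have hl := fcs_slice_get_last s1 k (k + i) hk (by omega) (by omega)
  unfold fcsPass at hp
  rw [← hz, ← hl] at hp
  simp only [Bool.and_eq_true] at hp
  obtain ⟨hbnd, hin⟩ := hp
  unfold fcsCstep fcsBgreedyStep
  simp only []
  rw [if_neg (by rw [Bool.not_eq_true', hbnd]; simp), if_pos hin]

-- … and failing candidates are a no-op
lemma fcsCstep_fail (s1 s2 : List Char) (n i k : Int)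
    (hi : 1 ≤ i) (hk : 0 ≤ k) (hik : k + i ≤ n) (hn : n = (s1.length : Int))
    (st : PySem.Set Int × List (List Char))
    (hp : fcsPass s1 s2 n k (k + i) = false) :
    fcsCstep s1 s2 n st i k = st := by
  have hz := fcs_slice_get_zero s1 k (k + i) hk (by omega) (by omega)
  have hl := fcs_slice_get_last s1 k (k + i) hk (by omega) (by omega)
  unfold fcsPass at hp
  rw [← hz, ← hl] at hp
  rw [Bool.and_eq_false_iff] at hp
  unfold fcsCstep
  simp only []
  rcases hp with hbnd | hin
  · rw [if_pos (by rw [Bool.not_eq_true']; exact hbnd)]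
  · split_ifs with hgua hcon hisin
    · rfl
    · rfl
    · exact absurd hisin (by simp [hin])
    · rfl

-- the selection that turns A's (length, start) candidates into B's accepted (start, end) pairs
def fcsSel (s1 s2 : List Char) (n : Int) (p : Int × Int) : Option (Int × Int) :=
  if fcsPass s1 s2 n p.2 (p.2 + p.1) then some (p.2, p.2 + p.1) else none

-- the covered-set fold over all candidates is the greedy fold over the selected ones
lemma fcs_cfold_eq_greedy (s1 s2 : List Char) (n : Int) (hn : n = (s1.length : Int))
    (l : List (Int × Int)) (hl : ∀ p ∈ l, 1 ≤ p.1 ∧ 0 ≤ p.2 ∧ p.2 + p.1 ≤ n) :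
    ∀ st : PySem.Set Int × List (List Char),
    l.foldl (fun st p => fcsCstep s1 s2 n st p.1 p.2) st
      = (l.filterMap (fcsSel s1 s2 n)).foldl (fcsBgreedyStep s1) st := by
  induction l with
  | nil => intro st; rfl
  | cons p t ih =>
    intro st
    obtain ⟨h1, h2, h3⟩ := hl p (by simp)
    have ht := fun q hq => hl q (List.mem_cons_of_mem _ hq)
    simp only [List.foldl_cons, List.filterMap_cons]
    by_cases hp : fcsPass s1 s2 n p.2 (p.2 + p.1) = true
    · have hsel : fcsSel s1 s2 n p = some (p.2, p.2 + p.1) := by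
        simp [fcsSel, hp]
      rw [fcsCstep_pass s1 s2 n p.1 p.2 h1 h2 (by omega) hn st hp, hsel,
        List.foldl_cons, ih ht]
    · have hsel : fcsSel s1 s2 n p = none := by
        simp [fcsSel, hp]
      rw [fcsCstep_fail s1 s2 n p.1 p.2 h1 h2 (by omega) hn st
        (Bool.eq_false_iff.mpr hp), hsel]
      exact ih ht st

-- the lexicographic sort key of B's stage 2
def fcsKey (p : Int × Int) : Lex (Int × Int) := toLex (p.1 - p.2, p.1)

-- Python's tuple-key sort is the sort by the lexicographic key
lemma fcs_sorted2_eq_sorted_lex (xs : List (Int × Int)) :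
    PySem.List.sorted2 xs (fun p => p.1 - p.2) (fun p => p.1)
      = PySem.List.sorted xs fcsKey := by
  have hbf : (fun (a b : Int × Int) => decide (a.1 - a.2 < b.1 - b.2) ||
      (!decide (b.1 - b.2 < a.1 - a.2) && decide (a.1 < b.1)))
      = (fun a b => decide (fcsKey a < fcsKey b)) := by
    funext a b
    rw [Bool.eq_iff_iff]
    simp only [fcsKey, Bool.or_eq_true, Bool.and_eq_true, Bool.not_eq_true',
      decide_eq_true_eq, decide_eq_false_iff_not, Prod.Lex.lt_iff, ofLex_toLex]
    omega
  rw [PySem.List.sorted_eq_foldl_insertBy]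
  show List.foldl (fun acc x => PySem.List.insertBy
      (fun a b => decide (a.1 - a.2 < b.1 - b.2) ||
        (!decide (b.1 - b.2 < a.1 - a.2) && decide (a.1 < b.1))) x acc) [] xs
    = List.foldl (fun acc x => PySem.List.insertBy
      (fun a b => decide (fcsKey a < fcsKey b)) x acc) [] xs
  rw [hbf]

-- A's enumeration order: length descending, then start ascending
lemma fcs_pairwise_cands (n ml : Int) :
    (fcsCands n ml).Pairwise (fun p q => q.1 < p.1 ∨ (p.1 = q.1 ∧ p.2 < q.2)) := by
  unfold fcsCands
  rw [List.pairwise_flatMap]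
  constructor
  · intro i hi
    rw [List.pairwise_map]
    exact (PySem.List.pairwise_lt_pyRange_one 0 (n - i + 1)).imp (fun h => Or.inr ⟨rfl, h⟩)
  · rw [PySem.List.pyRange_neg_one_eq_reverse, List.pairwise_reverse]
    refine (PySem.List.pairwise_lt_pyRange_one (ml - 1 + 1) (n + 1)).imp ?_
    intro a b hab x hx y hy
    rw [List.mem_map] at hx hy
    obtain ⟨ka, _, rfl⟩ := hx
    obtain ⟨kb, _, rfl⟩ := hy
    exact Or.inl hab

-- selected A-candidates are strictly increasing in the key
lemma fcs_pairwise_sel (s1 s2 : List Char) (n min_len : Int) :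
    ((fcsCands n min_len).filterMap (fcsSel s1 s2 n)).Pairwise
      (fun p q => fcsKey p < fcsKey q) := by
  refine List.Pairwise.filterMap (fcsSel s1 s2 n) ?_ (fcs_pairwise_cands n min_len)
  intro a a' hR b hb b' hb'
  unfold fcsSel at hb hb'
  by_cases hp : fcsPass s1 s2 n a.2 (a.2 + a.1) = true
  · rw [if_pos hp] at hb
    by_cases hp' : fcsPass s1 s2 n a'.2 (a'.2 + a'.1) = true
    · rw [if_pos hp'] at hb'
      injection hb with hb1; injection hb' with hb1'
      subst hb1; subst hb1'
      simp only [fcsKey, Prod.Lex.lt_iff, ofLex_toLex]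
      rcases hR with h | ⟨h1, h2⟩
      · left; omega
      · right; constructor <;> omega
    · rw [if_neg hp'] at hb'; cases hb'
  · rw [if_neg hp] at hb; cases hb

-- membership in the selected A-candidates
lemma fcs_mem_sel (s1 s2 : List Char) (n min_len : Int) (_hml : 1 ≤ min_len) (p : Int × Int) :
    p ∈ (fcsCands n min_len).filterMap (fcsSel s1 s2 n)
      ↔ 0 ≤ p.1 ∧ p.1 + min_len ≤ p.2 ∧ p.2 ≤ n ∧ fcsPass s1 s2 n p.1 p.2 = true := by
  rw [List.mem_filterMap]
  constructor
  · rintro ⟨a, ha, hsel⟩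
    unfold fcsCands at ha
    rw [List.mem_flatMap] at ha
    obtain ⟨i, hi, ha⟩ := ha
    rw [List.mem_map] at ha
    obtain ⟨k, hk, rfl⟩ := ha
    rw [PySem.List.mem_pyRange_neg_one] at hi
    rw [PySem.List.mem_pyRange_one] at hk
    unfold fcsSel at hsel
    by_cases hp : fcsPass s1 s2 n k (k + i) = true
    · rw [if_pos hp] at hsel
      injection hsel with h
      subst h
      refine ⟨by omega, by omega, by omega, hp⟩
    · rw [if_neg hp] at hsel; cases hsel
  · rintro ⟨h1, h2, h3, h4⟩
    refine ⟨(p.2 - p.1, p.1), ?_, ?_⟩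
    · unfold fcsCands
      rw [List.mem_flatMap]
      refine ⟨p.2 - p.1, ?_, ?_⟩
      · rw [PySem.List.mem_pyRange_neg_one]; omega
      · rw [List.mem_map]
        exact ⟨p.1, by rw [PySem.List.mem_pyRange_one]; omega, rfl⟩
    · unfold fcsSel
      simp only []
      have harr : p.1 + (p.2 - p.1) = p.2 := by ring
      rw [if_pos (by simp only [harr]; exact h4)]
      simp [harr]

-- membership in B's comprehension
lemma fcs_mem_bcands (s1 s2 : List Char) (min_len : Int) (p : Int × Int) :
    p ∈ fcsBcands s1 s2 min_len
      ↔ 0 ≤ p.1 ∧ p.1 + min_len ≤ p.2 ∧ p.2 ≤ (s1.length : Int) ∧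
        fcsPass s1 s2 (s1.length : Int) p.1 p.2 = true := by
  unfold fcsBcands
  simp only [List.mem_flatMap, List.mem_map, List.mem_filter,
    PySem.List.mem_pyRange_one]
  constructor
  · rintro ⟨k, hk, e, ⟨⟨he, hp⟩, rfl⟩⟩
    exact ⟨by omega, by omega, by omega, hp⟩
  · rintro ⟨h1, h2, h3, h4⟩
    exact ⟨p.1, by omega, p.2, ⟨⟨by omega, h4⟩, rfl⟩⟩

-- B's comprehension has no duplicates
lemma fcs_nodup_bcands (s1 s2 : List Char) (min_len : Int) :
    (fcsBcands s1 s2 min_len).Nodup := by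
  unfold fcsBcands
  show List.Pairwise _ _
  rw [List.pairwise_flatMap]
  constructor
  · intro k hk
    rw [List.pairwise_map]
    refine ((PySem.List.pairwise_lt_pyRange_one _ _).filter _).imp ?_
    intro e e' hee heq
    exact absurd (congrArg Prod.snd heq) (by simp; omega)
  · refine (PySem.List.pairwise_lt_pyRange_one _ _).imp ?_
    intro a b hab x hx y hy
    rw [List.mem_map] at hx hy
    obtain ⟨ea, _, rfl⟩ := hx
    obtain ⟨eb, _, rfl⟩ := hy
    intro heq
    exact absurd (congrArg Prod.fst heq) (by simp; omega)

-- sorting B's comprehension yields exactly the selected A-candidates, in A's order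
lemma fcs_sorted_bcands (s1 s2 : List Char) (min_len : Int) (hml : 1 ≤ min_len) :
    PySem.List.sorted (fcsBcands s1 s2 min_len) fcsKey
      = (fcsCands (s1.length : Int) min_len).filterMap
          (fcsSel s1 s2 (s1.length : Int)) := by
  apply PySem.List.sorted_eq_of_perm_of_pairwise_lt
  · have hnodup1 : ((fcsCands (s1.length : Int) min_len).filterMap
        (fcsSel s1 s2 (s1.length : Int))).Nodup := by
      have := fcs_pairwise_sel s1 s2 (s1.length : Int) min_len
      exact this.imp (fun h => fun he => absurd (he ▸ h) (lt_irrefl _))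
    rw [List.perm_ext_iff_of_nodup hnodup1 (fcs_nodup_bcands s1 s2 min_len)]
    intro p
    rw [fcs_mem_sel s1 s2 (s1.length : Int) min_len hml p,
      fcs_mem_bcands s1 s2 min_len p]
  · exact fcs_pairwise_sel s1 s2 (s1.length : Int) min_len

-- the two main loops agree
lemma fcsMain_eq (s1 s2 : List Char) (min_len : Int) (hml : 1 ≤ min_len) :
    fcsAmain s1 s2 min_len = fcsBmain s1 s2 min_len := by
  rw [fcsA_eq_cfold s1 s2 min_len hml]
  simp only [fcsBmain]
  rw [fcs_sorted2_eq_sorted_lex, fcs_sorted_bcands s1 s2 min_len hml,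
    fcs_cfold_eq_greedy s1 s2 (s1.length : Int) rfl
      (fcsCands (s1.length : Int) min_len)
      (fcsCands_bounds (s1.length : Int) min_len hml)]

-- ===== VERDICT (by name: the statement is the Claim_ definition above) =====
theorem find_common_subphrases_spec : Claim_equal_find_common_subphrases := by
  intro str1 str2 min_len _hDom hPre
  unfold Spec_find_common_subphrases
  simp only [find_common_subphrases, find_common_subphrases_alt]
  split_ifs with h
  · exact fcsMain_eq str2.toList str1.toList min_len hPre
  · exact fcsMain_eq str1.toList str2.toList min_len hPre
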